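-- pv_equiv track=rewrite | github.com/zjc664656505/LinguaLinked-Inference | system_pipeline/model_split/utils.py | process_module_arrangement
-- ===== SOURCE A (Python) =====
-- def process_module_arrangement(matrix):
--     devices = len(matrix)
--     modules = len(matrix[0])
--
--     # Initialize result
--     result = []
--
--     for i in range(devices):
--         to_merge_index = []
--         dynamic_index = []
--
--         for j in range(modules):
--             devices_needing_module = [device for device, val in enumerate(matrix) if val[j] == 1]
--             if len(devices_needing_module) > 1 and i in devices_needing_module:
--                 dynamic_index.append(j)
--             elif len(devices_needing_module) == 1 and i == devices_needing_module[0]: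
--                 to_merge_index.append(j)
--
--         result.append([to_merge_index, dynamic_index])
--
--     return result
-- ===== SOURCE B (Python) =====
-- def process_module_arrangement(matrix):
--     modules = len(matrix[0])
--     # one pass over the matrix to count, per column, how many devices need the module
--     counts = [sum(1 for row in matrix if row[j] == 1) for j in range(modules)]
--     result = []
--     for row in matrix:
--         merge = [j for j in range(modules) if row[j] == 1 and counts[j] == 1]
--         dynamic = [j for j in range(modules) if row[j] == 1 and counts[j] > 1]
--         result.append([merge, dynamic])
--     return result
-- ===== Notes on version B (the rewrite author's own statement) =====
-- stated objective: faster
-- what changed: A rescans the whole matrix for every (device, module) pair to list the devices needing each module; B computes per-column need-counts once and then classifies each module with a single lookup into the device's own row.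
import Mathlib
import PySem

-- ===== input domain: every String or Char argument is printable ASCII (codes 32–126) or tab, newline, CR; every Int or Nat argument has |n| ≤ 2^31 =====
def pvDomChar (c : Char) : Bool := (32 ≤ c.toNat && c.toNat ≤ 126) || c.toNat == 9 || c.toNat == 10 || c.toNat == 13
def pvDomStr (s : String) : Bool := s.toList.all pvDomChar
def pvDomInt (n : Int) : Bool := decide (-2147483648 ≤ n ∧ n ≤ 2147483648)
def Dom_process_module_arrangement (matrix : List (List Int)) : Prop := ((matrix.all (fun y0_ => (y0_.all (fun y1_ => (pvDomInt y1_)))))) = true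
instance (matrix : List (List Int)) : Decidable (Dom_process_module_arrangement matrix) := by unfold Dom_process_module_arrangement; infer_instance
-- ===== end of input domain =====

-- B replaces A's per-(device,module) rescans of the whole matrix by per-column counts computed once,
-- then a single pass over each device's own row (asymptotically faster).

-- ===== PORT A =====
-- [device for device, val in enumerate(matrix) if val[j] == 1]
-- (val[j] read with default 0: exact on Pre_, where every row has at least `modules` entries)
def pvOwners (matrix : List (List Int)) (j : Nat) : List Int :=
  ((PySem.List.enumerate matrix 0).filter (fun p => p.2.getD j 0 == 1)).map (fun p => p.1)

def process_module_arrangement (matrix : List (List Int)) : List (List (List Int)) :=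
  let devices := matrix.length
  let modules := (matrix.headD []).length
  (List.range devices).foldl (fun result (i : Nat) =>
    let st := (List.range modules).foldl (fun (st : List Int × List Int) (j : Nat) =>
      let need := pvOwners matrix j
      if need.length > 1 ∧ (i : Int) ∈ need then (st.1, st.2 ++ [(j : Int)])
      else if need.length = 1 ∧ (i : Int) = need.headD 0 then (st.1 ++ [(j : Int)], st.2)
      else st) ([], [])
    result ++ [[st.1, st.2]]) []

-- ===== PORT B =====
def process_module_arrangement_alt (matrix : List (List Int)) : List (List (List Int)) :=
  let modules := (matrix.headD []).length
  let counts := (List.range modules).map (fun j => (matrix.filter (fun row => row.getD j 0 == 1)).length)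
  matrix.foldl (fun result row =>
    let merge := ((List.range modules).filter
      (fun j => row.getD j 0 == 1 && counts.getD j 0 == 1)).map (fun (j : Nat) => (j : Int))
    let dynamic := ((List.range modules).filter
      (fun j => row.getD j 0 == 1 && decide (1 < counts.getD j 0))).map (fun (j : Nat) => (j : Int))
    result ++ [[merge, dynamic]]) []

-- ===== PRECONDITION & SPEC =====
-- Pre_ excludes exactly the inputs where the Python raises: the empty matrix (matrix[0] → IndexError)
-- and ragged matrices with a row shorter than the first row (val[j] → IndexError).
def Pre_process_module_arrangement (matrix : List (List Int)) : Prop :=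
  matrix ≠ [] ∧ ∀ row ∈ matrix, (matrix.headD []).length ≤ row.length
instance (matrix : List (List Int)) : Decidable (Pre_process_module_arrangement matrix) := by
  unfold Pre_process_module_arrangement; infer_instance

def pvWitness_process_module_arrangement : List (List Int) := [[1, 0], [0, 1], [1, 1]]

def Spec_process_module_arrangement (matrix : List (List Int)) (out : List (List (List Int))) : Prop := out = process_module_arrangement_alt matrix
instance (matrix : List (List Int)) (out : List (List (List Int))) : Decidable (Spec_process_module_arrangement matrix out) := by unfold Spec_process_module_arrangement; infer_instance

-- ===== CLAIM (what is proved, stated in full; the proofs are below) =====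
def Claim_equal_process_module_arrangement : Prop := ∀ (matrix : List (List Int)), Dom_process_module_arrangement matrix → Pre_process_module_arrangement matrix → Spec_process_module_arrangement matrix (process_module_arrangement matrix)

-- ===== LEMMAS AND PROOFS =====

theorem pv_decide_beq (a : Int) : decide (a = 1) = (a == 1) := by
  cases h : a == 1 <;> simp_all

-- the two-accumulator append loop of A is a pair of filters
theorem pv_pair_fold (l : List Nat) (c1 c2 : Nat → Prop) [DecidablePred c1] [DecidablePred c2]
    (a b : List Int) :
    l.foldl (fun (st : List Int × List Int) (j : Nat) =>
        if c1 j then (st.1, st.2 ++ [(j : Int)])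
        else if c2 j then (st.1 ++ [(j : Int)], st.2)
        else st) (a, b)
      = (a ++ ((l.filter (fun j => decide (¬ c1 j ∧ c2 j))).map (fun (j : Nat) => (j : Int))),
         b ++ ((l.filter (fun j => decide (c1 j))).map (fun (j : Nat) => (j : Int)))) := by
  induction l generalizing a b with
  | nil => simp
  | cons x xs ih =>
    by_cases h1 : c1 x
    · simp [h1, ih]
    · by_cases h2 : c2 x
      · simp [h1, h2, ih]
      · simp [h1, h2, ih]

theorem pv_owners_length (matrix : List (List Int)) (j : Nat) :
    (pvOwners matrix j).length = (matrix.filter (fun row => row.getD j 0 == 1)).length := by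
  unfold pvOwners
  rw [List.length_map]
  suffices h : ∀ (s : Int), ((PySem.List.enumerate matrix s).filter (fun p => p.2.getD j 0 == 1)).length
      = (matrix.filter (fun row => row.getD j 0 == 1)).length from h 0
  induction matrix with
  | nil => intro s; simp [PySem.List.enumerate_nil]
  | cons r rs ih =>
    intro s
    rw [PySem.List.enumerate_cons]
    simp only [List.filter_cons]
    split <;> simpa using ih (s+1)

theorem pv_mem_owners (matrix : List (List Int)) (j i : Nat) (hi : i < matrix.length) :
    ((i : Int) ∈ pvOwners matrix j) ↔ (matrix[i].getD j 0 = 1) := by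
  unfold pvOwners
  simp only [List.mem_map, List.mem_filter, PySem.List.mem_enumerate_iff]
  constructor
  · rintro ⟨p, ⟨⟨k, hk, rfl⟩, hq⟩, hfst⟩
    simp only [zero_add] at hfst
    have : k = i := by exact_mod_cast hfst
    subst this
    simpa using hq
  · intro h
    exact ⟨((i : Int), matrix[i]), ⟨⟨i, hi, by simp⟩, by simpa using h⟩, rfl⟩

theorem pv_owner_head (matrix : List (List Int)) (j i : Nat) (_hi : i < matrix.length)
    (h1 : (pvOwners matrix j).length = 1) :
    ((i : Int) = (pvOwners matrix j).headD 0) ↔ (i : Int) ∈ pvOwners matrix j := by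
  obtain ⟨d, hd⟩ := List.length_eq_one_iff.mp h1
  rw [hd]
  simp [eq_comm]

-- A as a map over device indices
theorem pv_A_eq_map (matrix : List (List Int)) :
    process_module_arrangement matrix
      = (List.range matrix.length).map (fun (i : Nat) =>
          let st := (List.range (matrix.headD []).length).foldl (fun (st : List Int × List Int) (j : Nat) =>
            let need := pvOwners matrix j
            if need.length > 1 ∧ (i : Int) ∈ need then (st.1, st.2 ++ [(j : Int)])
            else if need.length = 1 ∧ (i : Int) = need.headD 0 then (st.1 ++ [(j : Int)], st.2)
            else st) ([], [])
          [st.1, st.2]) := by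
  unfold process_module_arrangement
  rw [PySem.List.foldl_append_singleton_eq_map]
  simp

-- B as a map over rows
theorem pv_B_eq_map (matrix : List (List Int)) :
    process_module_arrangement_alt matrix
      = matrix.map (fun row =>
          [((List.range (matrix.headD []).length).filter
              (fun j => row.getD j 0 == 1 &&
                (((List.range (matrix.headD []).length).map
                    (fun j => (matrix.filter (fun r => r.getD j 0 == 1)).length)).getD j 0 == 1))).map (fun (j : Nat) => (j : Int)),
           ((List.range (matrix.headD []).length).filter
              (fun j => row.getD j 0 == 1 &&
                decide (1 < ((List.range (matrix.headD []).length).map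
                    (fun j => (matrix.filter (fun r => r.getD j 0 == 1)).length)).getD j 0))).map (fun (j : Nat) => (j : Int))]) := by
  unfold process_module_arrangement_alt
  rw [PySem.List.foldl_append_singleton_eq_map]
  simp

theorem pv_counts_getD (matrix : List (List Int)) (m j : Nat) (hj : j < m) :
    ((List.range m).map (fun j => (matrix.filter (fun r => r.getD j 0 == 1)).length)).getD j 0
      = (matrix.filter (fun r => r.getD j 0 == 1)).length := by
  rw [List.getD_eq_getElem?_getD, List.getElem?_map]
  simp [List.getElem?_range hj]

theorem pv_equal (matrix : List (List Int)) :
    process_module_arrangement matrix = process_module_arrangement_alt matrix := by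
  rw [pv_A_eq_map, pv_B_eq_map]
  apply List.ext_getElem
  · simp
  · intro i hi hi'
    simp only [List.getElem_map, List.getElem_range]
    have him : i < matrix.length := by simpa using hi
    rw [pv_pair_fold]
    simp only [List.nil_append]
    have hmerge : (List.range (matrix.headD []).length).filter
        (fun j => decide (¬ ((pvOwners matrix j).length > 1 ∧ (i : Int) ∈ pvOwners matrix j) ∧
          ((pvOwners matrix j).length = 1 ∧ (i : Int) = (pvOwners matrix j).headD 0)))
        = (List.range (matrix.headD []).length).filter
        (fun j => matrix[i].getD j 0 == 1 &&
          (((List.range (matrix.headD []).length).map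
              (fun j => (matrix.filter (fun r => r.getD j 0 == 1)).length)).getD j 0 == 1)) := by
      apply List.filter_congr
      intro j hj
      have hjm : j < (matrix.headD []).length := by simpa using hj
      rw [pv_counts_getD matrix _ j hjm, ← pv_owners_length]
      have hmem := pv_mem_owners matrix j i him
      by_cases hc : (pvOwners matrix j).length = 1
      · have hhead := pv_owner_head matrix j i him hc
        have hng : ¬ ((pvOwners matrix j).length > 1) := by omega
        by_cases hv : matrix[i].getD j 0 = 1
        · simp only [hc, hhead, hmem]
          simp [pv_decide_beq]
        · simp only [hc, hhead, hmem]
          simp [pv_decide_beq]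
      · simp [hc]
    have hdyn : (List.range (matrix.headD []).length).filter
        (fun j => decide ((pvOwners matrix j).length > 1 ∧ (i : Int) ∈ pvOwners matrix j))
        = (List.range (matrix.headD []).length).filter
        (fun j => matrix[i].getD j 0 == 1 &&
          decide (1 < ((List.range (matrix.headD []).length).map
              (fun j => (matrix.filter (fun r => r.getD j 0 == 1)).length)).getD j 0)) := by
      apply List.filter_congr
      intro j hj
      have hjm : j < (matrix.headD []).length := by simpa using hj
      rw [pv_counts_getD matrix _ j hjm, ← pv_owners_length]
      have hmem := pv_mem_owners matrix j i him
      by_cases h1 : 1 < (pvOwners matrix j).length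
      · simp [h1, hmem, pv_decide_beq]
      · simp [h1, hmem]
    rw [hmerge, hdyn]

-- ===== VERDICT (by name: the statement is the Claim_ definition above) =====
theorem process_module_arrangement_spec : Claim_equal_process_module_arrangement := by
  intro matrix _ _
  unfold Spec_process_module_arrangement
  exact pv_equal matrix
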